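-- pv_equiv track=rewrite | github.com/laurenfields/Neuropeptide_Database_Search | AMM_PSM_opt_v01.py | list_of_residues
-- ===== SOURCE A (Python) =====
-- def list_of_residues(pot_mod_peptide):
--     list_of_res = []
--     pep_update = []
--     pep_update.append(pot_mod_peptide)
--     no_mods = pot_mod_peptide.count('(')
--     if no_mods > 1:
--         for c in range(0,no_mods+1):
--             pep_of_interest = pep_update[-1]
--             if '(' in pep_of_interest:
--                 first_ptm_start = pep_of_interest.index('(')
--                 first_ptm_end = pep_of_interest.index(')')
--
--                 first_residues = pep_of_interest[:(first_ptm_start-1)]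
--                 for a in first_residues:
--                     list_of_res.append(a)
--                 ptm_residue = pep_of_interest[(first_ptm_start-1):(first_ptm_end+1)]
--                 list_of_res.append(ptm_residue)
--                 remaining_pep = pep_of_interest[(first_ptm_end+1):]
--                 pep_update.append(remaining_pep)
--             else:
--                 for d in pep_of_interest:
--                     list_of_res.append(d)
--     elif no_mods == 1:
--         for c in range(0,1):
--             pep_of_interest = pep_update[-1]
--             if '(' in pep_of_interest:
--                 first_ptm_start = pep_of_interest.index('(')
--                 first_ptm_end = pep_of_interest.index(')')
--                 if first_ptm_start == 1:
--                     ptm_residue =  pep_of_interest[0] + (pep_of_interest[(first_ptm_start):(first_ptm_end+1)])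
--                     list_of_res.append(ptm_residue)
--                     remaining_pep = pep_of_interest[(first_ptm_end+1):]
--                     for d in remaining_pep:
--                         list_of_res.append(d)
--                 if first_ptm_start != 1:
--                     first_residues = pep_of_interest[:(first_ptm_start-1)]
--                     for a in first_residues:
--                         list_of_res.append(a)
--                     ptm_residue = pep_of_interest[(first_ptm_start-1):(first_ptm_end+1)]
--                     list_of_res.append(ptm_residue)
--                     remaining_pep = pep_of_interest[(first_ptm_end+1):]
--                     for d in remaining_pep:
--                         list_of_res.append(d)
--             else:
--                 for d in pep_of_interest:
--                     list_of_res.append(d)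
--     elif no_mods == 0:
--         for c in pot_mod_peptide:
--             list_of_res.append(c)
--     return list_of_res
-- ===== SOURCE B (Python) =====
-- def list_of_residues(pot_mod_peptide):
--     s = pot_mod_peptide
--     out = []
--     i = 0
--     n = len(s)
--     while i < n:
--         if i + 1 < n and s[i + 1] == '(':
--             j = s.index(')', i + 1)
--             out.append(s[i:j + 1])
--             i = j + 1
--         else:
--             out.append(s[i])
--             i += 1
--     return out
-- ===== Notes on version B (the rewrite author's own statement) =====
-- stated objective: simpler
-- what changed: Replaced A's count-then-repeatedly-reslice loop (three separate branches for 0/1/many modifications, re-scanning and copying the remaining peptide once per modification) by one uniform left-to-right pass that emits a residue char, or the residue grouped with its parenthesised PTM when a modification follows.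
-- outside the precondition, e.g. on list_of_residues('A(x)(y)B'): A returns ['A(x)', '(', 'y', ')', '', 'B'], B returns ['A(x)', '(', 'y', ')', 'B']; on list_of_residues('('): A raises ValueError, B returns ['(']
import Mathlib
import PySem

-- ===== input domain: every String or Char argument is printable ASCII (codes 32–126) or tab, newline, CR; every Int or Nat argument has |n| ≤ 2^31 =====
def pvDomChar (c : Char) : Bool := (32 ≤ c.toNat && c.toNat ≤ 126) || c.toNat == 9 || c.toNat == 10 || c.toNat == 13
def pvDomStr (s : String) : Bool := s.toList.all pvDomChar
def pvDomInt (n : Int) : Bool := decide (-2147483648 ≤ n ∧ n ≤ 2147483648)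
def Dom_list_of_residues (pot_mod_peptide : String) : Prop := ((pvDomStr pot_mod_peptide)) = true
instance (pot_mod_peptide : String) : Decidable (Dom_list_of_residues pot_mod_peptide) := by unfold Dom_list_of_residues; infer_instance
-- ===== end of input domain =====

-- B replaces A's count-then-repeatedly-reslice tokenizer (three branches) by one uniform left-to-right pass
-- (simpler); Pre_ excludes malformed parenthesisation, where A raises or its output is accidental.


-- ===== PORT A =====
-- 'for d in t: list_of_res.append(d)'  (iterating a str yields one-char strings)
def pvCharAppend (acc : List String) (t : String) : List String :=
  t.toList.foldl (fun a d => a ++ [String.ofList [d]]) acc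

-- loop body of the 'no_mods > 1' branch; state = (list_of_res, pep_update)
def pvStepMulti (st : List String × List String) : List String × List String :=
  let pep := PySem.List.pyGetD st.2 (-1) ""      -- pep_update[-1] (pep_update is never empty)
  if PySem.Str.isIn "(" pep then
    let fps := PySem.Str.find pep "("            -- str.index; guarded by the membership test, so find = index
    let fpe := PySem.Str.find pep ")"            -- str.index; Pre_ excludes the no-')' ValueError case
    let acc1 := pvCharAppend st.1 (PySem.Str.slice pep none (some (fps - 1)))
    let ptm := PySem.Str.slice pep (some (fps - 1)) (some (fpe + 1))
    let remaining := PySem.Str.slice pep (some (fpe + 1)) none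
    (acc1 ++ [ptm], st.2 ++ [remaining])
  else
    (pvCharAppend st.1 pep, st.2)

-- loop body of the 'no_mods == 1' branch (its two inner 'if's are sequential and mutually exclusive)
def pvStepOne (st : List String × List String) : List String × List String :=
  let pep := PySem.List.pyGetD st.2 (-1) ""
  if PySem.Str.isIn "(" pep then
    let fps := PySem.Str.find pep "("
    let fpe := PySem.Str.find pep ")"            -- Pre_ excludes the no-')' ValueError case
    let st1 :=
      if fps = 1 then
        -- pep[0] + pep[fps:fpe+1]  (pep[0] is in range because fps = 1)
        let ptm := String.ofList (((PySem.Str.pyGet? pep 0).map (fun c => [c])).getD [] ++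
                              (PySem.Str.slice pep (some fps) (some (fpe + 1))).toList)
        (pvCharAppend (st.1 ++ [ptm]) (PySem.Str.slice pep (some (fpe + 1)) none), st.2)
      else st
    if fps ≠ 1 then
      let acc1 := pvCharAppend st1.1 (PySem.Str.slice pep none (some (fps - 1)))
      let ptm := PySem.Str.slice pep (some (fps - 1)) (some (fpe + 1))
      (pvCharAppend (acc1 ++ [ptm]) (PySem.Str.slice pep (some (fpe + 1)) none), st1.2)
    else st1
  else
    (pvCharAppend st.1 pep, st.2)

def list_of_residues (pot_mod_peptide : String) : List String :=
  let no_mods := PySem.Str.count pot_mod_peptide "("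
  if no_mods > 1 then
    ((PySem.List.pyRange 0 ((no_mods : Int) + 1) 1).foldl (fun st _ => pvStepMulti st)
      ([], [pot_mod_peptide])).1
  else if no_mods = 1 then
    ((PySem.List.pyRange 0 1 1).foldl (fun st _ => pvStepOne st) ([], [pot_mod_peptide])).1
  else
    pvCharAppend [] pot_mod_peptide

-- ===== PORT B =====
-- Source B's single pass: emit s[i]; if s[i+1] == '(' emit s[i:j+1] where j = s.index(')', i+1), resume at j+1.
-- fuel (initially the string length, one char is consumed per step) only makes the recursion structural.
def pvAltGo : Nat → List Char → List String
  | 0, _ => []                     -- unreachable: fuel starts at the length and one char is consumed per step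
  | _ + 1, [] => []
  | fuel + 1, c :: rest =>
    if rest.head? = some '(' then          -- 'i + 1 < n and s[i+1] == "("'
      if (rest.dropWhile (fun d => d ≠ ')')).isEmpty then
        [String.ofList (c :: rest)]        -- no ')': Python B raises ValueError here; outside Pre_
      else
        String.ofList (c :: rest.takeWhile (fun d => d ≠ ')') ++ [')']) ::
          pvAltGo fuel (rest.dropWhile (fun d => d ≠ ')')).tail
    else String.ofList [c] :: pvAltGo fuel rest

def list_of_residues_alt (pot_mod_peptide : String) : List String :=
  pvAltGo pot_mod_peptide.toList.length pot_mod_peptide.toList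

-- ===== PRECONDITION & SPEC =====
def pvParen (c : Char) : Bool := c = '(' || c = ')'

-- Pre_ excludes malformed parenthesisation — there A either raises ValueError (an unclosed modification
-- parenthesis) or returns an accidental mix of split parens and empty-string tokens produced by its slicing.
-- Well-formed means: either no opening paren at all, or the paren characters alternate open/close
-- and every opening paren follows a residue char.
def Pre_list_of_residues (pot_mod_peptide : String) : Prop :=
  '(' ∉ pot_mod_peptide.toList ∨
  (pot_mod_peptide.toList.filter pvParen =
      (List.replicate (pot_mod_peptide.toList.count '(') ['(', ')']).flatten ∧
   pot_mod_peptide.toList.head? ≠ some '(' ∧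
   ∀ p ∈ pot_mod_peptide.toList.zip pot_mod_peptide.toList.tail, p.2 = '(' → pvParen p.1 = false)
instance (pot_mod_peptide : String) : Decidable (Pre_list_of_residues pot_mod_peptide) := by
  unfold Pre_list_of_residues; infer_instance

def pvWitness_list_of_residues : String := "AB(xy)C"

def Spec_list_of_residues (pot_mod_peptide : String) (out : List String) : Prop := out = list_of_residues_alt pot_mod_peptide
instance (pot_mod_peptide : String) (out : List String) : Decidable (Spec_list_of_residues pot_mod_peptide out) := by unfold Spec_list_of_residues; infer_instance

-- ===== CLAIM (what is proved, stated in full; the proofs are below) =====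
def Claim_equal_list_of_residues : Prop := ∀ (pot_mod_peptide : String), Dom_list_of_residues pot_mod_peptide → Pre_list_of_residues pot_mod_peptide → Spec_list_of_residues pot_mod_peptide (list_of_residues pot_mod_peptide)

-- ===== LEMMAS AND PROOFS =====

-- canonical fuel application of B's pass
def pvTok (l : List Char) : List String := pvAltGo l.length l

-- fuel does not matter once it covers the length
theorem pv_altGo_fuel : ∀ (f1 : Nat) (l : List Char) (f2 : Nat), l.length ≤ f1 → l.length ≤ f2 →
    pvAltGo f1 l = pvAltGo f2 l := by
  intro f1
  induction f1 with
  | zero => intro l f2 h1 _; simp at h1; subst h1; cases f2 <;> rfl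
  | succ f ih =>
    intro l f2 h1 h2
    cases l with
    | nil => cases f2 <;> rfl
    | cons c rest =>
      cases f2 with
      | zero => simp at h2
      | succ f2' =>
        simp only [pvAltGo]
        by_cases hh : rest.head? = some '('
        · simp only [hh, if_true]
          have hd := (List.dropWhile_sublist (l := rest) (p := fun d => d ≠ ')')).length_le
          by_cases he : (rest.dropWhile (fun d => d ≠ ')')).isEmpty
          · simp only [he, if_true]
          · simp only [he, if_false]
            simp at h1 h2
            have hlt : (rest.dropWhile (fun d => d ≠ ')')).tail.length ≤ rest.length - 1 := by
              rcases hdw : rest.dropWhile (fun d => d ≠ ')') with _ | ⟨y, t⟩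
              · simp
              · rw [hdw] at hd; simp at hd ⊢; omega
            rw [ih _ f2' (by omega) (by omega)]
        · simp only [hh, if_false]
          simp at h1 h2
          rw [ih rest f2' (by omega) (by omega)]

theorem pvTok_cons (c : Char) (rest : List Char) :
    pvTok (c :: rest) =
      if rest.head? = some '(' then
        if (rest.dropWhile (fun d => d ≠ ')')).isEmpty then [String.ofList (c :: rest)]
        else String.ofList (c :: rest.takeWhile (fun d => d ≠ ')') ++ [')']) ::
               pvAltGo rest.length (rest.dropWhile (fun d => d ≠ ')')).tail
      else String.ofList [c] :: pvTok rest := rfl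

theorem pvTok_cons_nogrp (c : Char) (l : List Char) (h : l.head? ≠ some '(') :
    pvTok (c :: l) = String.ofList [c] :: pvTok l := by
  rw [pvTok_cons, if_neg h]

theorem pv_dropWhile_mid {p : Char → Bool} (mid post : List Char)
    (h : ∀ x ∈ mid, p x = true) (hy : p ')' = false) :
    (mid ++ ')' :: post).dropWhile p = ')' :: post ∧
    (mid ++ ')' :: post).takeWhile p = mid := by
  induction mid with
  | nil => simp [hy]
  | cons x xs ih =>
    have hx : p x = true := h x (by simp)
    have := ih (fun y hy => h y (by simp [hy]))
    simp [hx, this.1, this.2]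

theorem pvTok_cons_grp (c : Char) (mid post : List Char) (h : ∀ x ∈ mid, x ≠ ')') :
    pvTok (c :: ('(' :: (mid ++ ')' :: post))) =
      String.ofList (c :: ('(' :: (mid ++ [')']))) :: pvTok post := by
  have hmid : ∀ x ∈ ('(' :: mid), (!decide (x = ')')) = true := by
    intro x hx
    have hx' : x = '(' ∨ x ∈ mid := by simpa using hx
    rcases hx' with h1 | h1
    · simp [h1]
    · simpa using h x h1
  have hdt := pv_dropWhile_mid (p := fun d => !decide (d = ')')) ('(' :: mid) post hmid (by simp)
  have hd : (('(' :: (mid ++ ')' :: post)) : List Char).dropWhile (fun d => !decide (d = ')')) = ')' :: post := by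
    simpa using hdt.1
  have ht : (('(' :: (mid ++ ')' :: post)) : List Char).takeWhile (fun d => !decide (d = ')')) = '(' :: mid := by
    simpa using hdt.2
  rw [pvTok_cons]
  simp [hd, ht]
  exact pv_altGo_fuel _ post _ (by omega) (le_refl _)

theorem pvTok_nogroup (l : List Char) (h : ∀ x ∈ l, x ≠ '(') :
    pvTok l = l.map (fun d => String.ofList [d]) := by
  induction l with
  | nil => rfl
  | cons c rest ih =>
    have hh : rest.head? ≠ some '(' := by
      cases rest with
      | nil => simp
      | cons y ys => simpa using h y (by simp)
    rw [pvTok_cons_nogrp c rest hh, ih (fun x hx => h x (by simp [hx]))]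
    rfl

theorem pvTok_group (pre : List Char) (c : Char) (mid post : List Char)
    (hpre : ∀ x ∈ pre, x ≠ '(') (hc : c ≠ '(') (hmid : ∀ x ∈ mid, x ≠ ')') :
    pvTok (pre ++ c :: ('(' :: (mid ++ ')' :: post))) =
      pre.map (fun d => String.ofList [d]) ++
        String.ofList (c :: ('(' :: (mid ++ [')']))) :: pvTok post := by
  induction pre with
  | nil => simpa using pvTok_cons_grp c mid post hmid
  | cons x xs ih =>
    have hh : (xs ++ c :: ('(' :: (mid ++ ')' :: post))).head? ≠ some '(' := by
      cases xs with
      | nil => simpa using hc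
      | cons y ys => simpa using hpre y (by simp)
    rw [List.cons_append, pvTok_cons_nogrp x _ hh, ih (fun y hy => hpre y (by simp [hy]))]
    simp


-- ---- A-side generic facts ----

theorem pv_getD_last {α : Type} [Inhabited α] (xs : List α) (x d : α) :
    PySem.List.pyGetD (xs ++ [x]) (-1) d = x := by
  simp [PySem.List.pyGetD, PySem.List.pyGet?, PySem.List.pyIdx?]

theorem pv_foldl_const {α : Type} (f : α → α) :
    ∀ (l : List Int) (init : α), l.foldl (fun a _ => f a) init = f^[l.length] init := by
  intro l
  induction l with
  | nil => intro init; rfl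
  | cons x xs ih => intro init; simp [List.foldl_cons, ih, Function.iterate_succ_apply]

theorem pv_count_go (c : Char) :
    ∀ (l : List Char) (fuel acc : Nat), l.length ≤ fuel →
      PySem.Chars.count.go [c] fuel l acc = acc + l.count c := by
  intro l
  induction l with
  | nil => intro fuel acc _; cases fuel <;> simp [PySem.Chars.count.go]
  | cons x t ih =>
    intro fuel acc hf
    cases fuel with
    | zero => simp at hf
    | succ f =>
      simp only [PySem.Chars.count.go]
      by_cases hx : x = c
      · subst hx
        have : ([x] : List Char).isPrefixOf (x :: t) = true := by simp [List.isPrefixOf]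
        simp only [this, if_true, List.length_cons, List.length_nil, List.drop_succ_cons, List.drop_zero]
        rw [ih f (acc + 1) (by simpa using hf)]
        simp
        omega
      · have : ([c] : List Char).isPrefixOf (x :: t) = false := by
          simp [List.isPrefixOf]; exact fun h => absurd h.symm hx
        simp only [this, if_false, Bool.false_eq_true]
        rw [ih f acc (by simpa using hf)]
        simp [hx]

theorem pv_count_paren (s : String) : PySem.Str.count s "(" = s.toList.count '(' := by
  have h1 : ("(" : String).toList = ['('] := rfl
  show PySem.Chars.count s.toList ("(" : String).toList = _
  rw [h1]
  unfold PySem.Chars.count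
  rw [if_neg (by simp)]
  simpa using pv_count_go '(' s.toList s.toList.length 0 (le_refl _)

theorem pv_find_go (c : Char) :
    ∀ (pre : List Char) (suf : List Char) (k : Nat), (∀ x ∈ pre, x ≠ c) →
      PySem.Chars.find.go [c] (pre ++ c :: suf) k = (k : Int) + pre.length := by
  intro pre
  induction pre with
  | nil =>
    intro suf k _
    simp only [List.nil_append, PySem.Chars.find.go]
    rw [if_pos (by simp [List.isPrefixOf])]
    simp
  | cons x xs ih =>
    intro suf k hx
    simp only [List.cons_append, PySem.Chars.find.go]
    rw [if_neg (by simp [List.isPrefixOf]; exact fun h => absurd h.symm (hx x (by simp)))]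
    rw [ih suf (k + 1) (fun y hy => hx y (by simp [hy]))]
    simp only [List.length_cons]; push_cast; omega

theorem pv_find_eq (pre : List Char) (c : Char) (suf : List Char) (h : ∀ x ∈ pre, x ≠ c) :
    PySem.Chars.find (pre ++ c :: suf) [c] = pre.length := by
  unfold PySem.Chars.find
  simpa using pv_find_go c pre suf 0 h

theorem pv_isIn_iff (p : String) : PySem.Str.isIn "(" p = true ↔ '(' ∈ p.toList := by
  rw [PySem.Str.isIn_iff_infix]
  show (("(" : String).toList) <:+: p.toList ↔ _
  rw [show ("(" : String).toList = ['('] from rfl]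
  exact List.singleton_infix_iff '(' p.toList

theorem pv_charAppend (acc : List String) (t : String) :
    pvCharAppend acc t = acc ++ t.toList.map (fun d => String.ofList [d]) := by
  unfold pvCharAppend
  exact PySem.List.foldl_append_singleton_eq_map (f := fun d => String.ofList [d]) t.toList acc

-- ---- well-formedness: decomposition of a well-formed peptide at its first modification ----

theorem pv_split_first :
    ∀ (l : List Char) (y : Char) (ys : List Char), l.filter pvParen = y :: ys →
      ∃ m t, l = m ++ y :: t ∧ (∀ z ∈ m, pvParen z = false) ∧ t.filter pvParen = ys := by
  intro l
  induction l with
  | nil => intro y ys h; simp at h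
  | cons x xs ih =>
    intro y ys h
    by_cases hx : pvParen x = true
    · rw [List.filter_cons_of_pos hx] at h
      obtain ⟨h1, h2⟩ := List.cons.inj h
      exact ⟨[], xs, by simp [h1], by simp, h2⟩
    · rw [List.filter_cons_of_neg hx] at h
      obtain ⟨m, t, h1, h2, h3⟩ := ih y ys h
      exact ⟨x :: m, t, by simp [h1], by
        intro z hz
        rcases (by simpa using hz : z = x ∨ z ∈ m) with h4 | h4
        · simpa [h4] using hx
        · exact h2 z h4, h3⟩

theorem pv_count_flatten : ∀ (n : Nat), ((List.replicate n (['(', ')'] : List Char)).flatten).count '(' = n := by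
  intro n
  induction n with
  | zero => rfl
  | succ m ih => simp [List.replicate_succ, ih]

theorem pv_zip_tail_sub {α : Type} (x : α) (w : List α) (p : α × α) (h : p ∈ w.zip w.tail) :
    p ∈ (x :: w).zip (x :: w).tail := by
  cases w with
  | nil => simp at h
  | cons y w' => simp only [List.tail_cons, List.zip_cons_cons] at *; exact List.mem_cons_of_mem _ h

theorem pv_zip_suffix {α : Type} :
    ∀ (u v : List α) (p : α × α), p ∈ v.zip v.tail → p ∈ (u ++ v).zip (u ++ v).tail := by
  intro u
  induction u with
  | nil => intro v p h; simpa using h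
  | cons x xs ih => intro v p h; exact pv_zip_tail_sub x (xs ++ v) p (ih v p h)

theorem pv_adj_mem {α : Type} :
    ∀ (u : List α) (a b : α) (v : List α), (a, b) ∈ ((u ++ a :: b :: v).zip (u ++ a :: b :: v).tail) := by
  intro u a b v
  exact pv_zip_suffix u (a :: b :: v) (a, b) (by simp)

theorem pv_decomp (l : List Char) (hin : '(' ∈ l)
    (h1 : l.filter pvParen = (List.replicate (l.count '(') ['(', ')']).flatten)
    (h2 : l.head? ≠ some '(')
    (h3 : ∀ p ∈ l.zip l.tail, p.2 = '(' → pvParen p.1 = false) :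
    ∃ pre c mid post, l = pre ++ c :: ('(' :: (mid ++ ')' :: post)) ∧
      (∀ x ∈ pre, pvParen x = false) ∧ pvParen c = false ∧ (∀ x ∈ mid, pvParen x = false) ∧
      post.count '(' + 1 = l.count '(' ∧
      post.filter pvParen = (List.replicate (post.count '(') ['(', ')']).flatten ∧
      post.head? ≠ some '(' ∧
      (∀ p ∈ post.zip post.tail, p.2 = '(' → pvParen p.1 = false) := by
  have hk : 0 < l.count '(' := List.count_pos_iff.mpr hin
  obtain ⟨k', hk'⟩ : ∃ k', l.count '(' = k' + 1 := ⟨l.count '(' - 1, by omega⟩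
  rw [hk', List.replicate_succ, List.flatten_cons] at h1
  obtain ⟨m, t, hm1, hm2, hm3⟩ := pv_split_first l '(' (')' :: (List.replicate k' ['(', ')']).flatten) h1
  obtain ⟨mid, post, ht1, ht2, ht3⟩ := pv_split_first t ')' ((List.replicate k' ['(', ')']).flatten) hm3
  have hmne : m ≠ [] := by
    intro hnil
    rw [hnil] at hm1
    exact h2 (by simp [hm1])
  obtain ⟨pre, c, hpc⟩ := (List.eq_nil_or_concat m).resolve_left hmne
  have hcount : post.count '(' = k' := by
    have : post.count '(' = (post.filter pvParen).count '(' := (List.count_filter (by simp [pvParen])).symm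
    rw [this, ht3, pv_count_flatten]
  have hl : l = pre ++ c :: ('(' :: (mid ++ ')' :: post)) := by
    rw [hm1, hpc, ht1]; simp
  refine ⟨pre, c, mid, post, hl, ?_, ?_, ?_, by omega, by rw [hcount]; exact ht3, ?_, ?_⟩
  · intro x hx; exact hm2 x (by simp [hpc, hx])
  · exact hm2 c (by simp [hpc])
  · exact ht2
  · -- post cannot begin with '(': the pair (')', '(') would violate h3
    intro hpost
    cases post with
    | nil => simp at hpost
    | cons q qs =>
      have hq : q = '(' := by simpa using hpost
      subst hq
      have hpair : ((')', '(') : Char × Char) ∈ l.zip l.tail := by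
        rw [hl]
        have : pre ++ c :: ('(' :: (mid ++ ')' :: '(' :: qs)) =
            (pre ++ c :: '(' :: mid) ++ ')' :: '(' :: qs := by simp
        rw [this]
        exact pv_adj_mem _ ')' '(' qs
      have := h3 _ hpair rfl
      simp [pvParen] at this
  · intro p hp hsnd
    refine h3 p ?_ hsnd
    rw [hl]
    have : pre ++ c :: ('(' :: (mid ++ ')' :: post)) = (pre ++ c :: '(' :: mid ++ [')']) ++ post := by simp
    rw [this]
    exact pv_zip_suffix _ post p hp

-- ---- evaluating A's loop bodies on a well-formed remaining peptide ----

theorem pv_take_tok (c d : Char) (mid post : List Char) :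
    (c :: d :: (mid ++ ')' :: post)).take (mid.length + 3) = c :: d :: (mid ++ [')']) := by
  rw [show mid.length + 3 = ((mid.length + 1) + 1) + 1 from by omega]
  rw [List.take_succ_cons, List.take_succ_cons, List.take_length_add_append]
  simp

theorem pv_drop_tok (pre : List Char) (c : Char) (mid post : List Char) :
    (pre ++ c :: ('(' :: (mid ++ ')' :: post))).drop (pre.length + 3 + mid.length) = post := by
  have h : pre ++ c :: ('(' :: (mid ++ ')' :: post)) = (pre ++ c :: ('(' :: (mid ++ [')']))) ++ post := by
    simp
  rw [h, List.drop_left' (by simp; omega)]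

theorem pv_find_open (p : String) (pre : List Char) (c : Char) (mid post : List Char)
    (hp : p.toList = pre ++ c :: ('(' :: (mid ++ ')' :: post)))
    (hpre : ∀ x ∈ pre, pvParen x = false) (hc : pvParen c = false) :
    PySem.Str.find p "(" = ((pre.length + 1 : Nat) : Int) := by
  show PySem.Chars.find p.toList ("(" : String).toList = _
  rw [show ("(" : String).toList = ['('] from rfl, hp]
  rw [show pre ++ c :: ('(' :: (mid ++ ')' :: post)) = (pre ++ [c]) ++ '(' :: (mid ++ ')' :: post) from by simp]
  rw [pv_find_eq (pre ++ [c]) '(' _ ?_]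
  · simp
  · intro x hx
    rcases (by simpa using hx : x ∈ pre ∨ x = c) with h1 | h1
    · intro he; subst he; simpa [pvParen] using hpre _ h1
    · subst h1; intro he; subst he; simp [pvParen] at hc

theorem pv_find_close (p : String) (pre : List Char) (c : Char) (mid post : List Char)
    (hp : p.toList = pre ++ c :: ('(' :: (mid ++ ')' :: post)))
    (hpre : ∀ x ∈ pre, pvParen x = false) (hc : pvParen c = false)
    (hmid : ∀ x ∈ mid, pvParen x = false) :
    PySem.Str.find p ")" = ((pre.length + 2 + mid.length : Nat) : Int) := by
  show PySem.Chars.find p.toList (")" : String).toList = _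
  rw [show (")" : String).toList = [')'] from rfl, hp]
  rw [show pre ++ c :: ('(' :: (mid ++ ')' :: post)) = (pre ++ c :: '(' :: mid) ++ ')' :: post from by simp]
  rw [pv_find_eq (pre ++ c :: '(' :: mid) ')' _ ?_]
  · simp; omega
  · intro x hx
    rcases (by simpa using hx : x ∈ pre ∨ x = c ∨ x = '(' ∨ x ∈ mid) with h1 | h1 | h1 | h1
    · intro he; subst he; simpa [pvParen] using hpre _ h1
    · subst h1; intro he; subst he; simp [pvParen] at hc
    · subst h1; simp
    · intro he; subst he; simpa [pvParen] using hmid _ h1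

theorem pv_slices (p : String) (pre : List Char) (c : Char) (mid post : List Char)
    (hp : p.toList = pre ++ c :: ('(' :: (mid ++ ')' :: post))) :
    PySem.Str.slice p none (some (((pre.length + 1 : Nat) : Int) - 1)) = String.ofList pre ∧
    PySem.Str.slice p (some (((pre.length + 1 : Nat) : Int) - 1))
        (some (((pre.length + 2 + mid.length : Nat) : Int) + 1)) =
      String.ofList (c :: ('(' :: (mid ++ [')']))) ∧
    PySem.Str.slice p (some (((pre.length + 2 + mid.length : Nat) : Int) + 1)) none =
      String.ofList post := by
  have e1 : ((pre.length + 1 : Nat) : Int) - 1 = ((pre.length : Nat) : Int) := by push_cast; ring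
  have e2 : ((pre.length + 2 + mid.length : Nat) : Int) + 1 = ((pre.length + 3 + mid.length : Nat) : Int) := by
    push_cast; ring
  refine ⟨?_, ?_, ?_⟩
  · show String.ofList (PySem.Chars.slice p.toList none _) = _
    rw [e1]
    simp only [PySem.Chars.slice_eq_listSlice, PySem.List.slice_to_natCast]
    rw [hp, show pre ++ c :: ('(' :: (mid ++ ')' :: post)) = pre ++ (c :: ('(' :: (mid ++ ')' :: post))) from rfl]
    rw [List.take_left]
  · show String.ofList (PySem.Chars.slice p.toList _ _) = _
    rw [e1, e2]
    simp only [PySem.Chars.slice_eq_listSlice, PySem.List.slice_natCast]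
    rw [hp, show pre ++ c :: ('(' :: (mid ++ ')' :: post)) = pre ++ (c :: ('(' :: (mid ++ ')' :: post))) from rfl]
    rw [List.drop_left]
    rw [show pre.length + 3 + mid.length - pre.length = mid.length + 3 from by omega]
    rw [show (c :: ('(' :: (mid ++ ')' :: post))) = c :: '(' :: (mid ++ ')' :: post) from rfl]
    rw [pv_take_tok]
  · show String.ofList (PySem.Chars.slice p.toList _ _) = _
    rw [e2]
    simp only [PySem.Chars.slice_eq_listSlice, PySem.List.slice_from_natCast]
    rw [hp, pv_drop_tok]

theorem pv_stepMulti_nogrp (acc peps : List String) (p : String) (h : '(' ∉ p.toList) :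
    pvStepMulti (acc, peps ++ [p]) =
      (acc ++ p.toList.map (fun d => String.ofList [d]), peps ++ [p]) := by
  have hB : PySem.Str.isIn "(" p ≠ true := by
    intro hyes; exact h ((pv_isIn_iff p).mp hyes)
  simp only [pvStepMulti, pv_getD_last]
  rw [if_neg hB, pv_charAppend]

theorem pv_stepMulti_grp (acc peps : List String) (p : String)
    (pre : List Char) (c : Char) (mid post : List Char)
    (hp : p.toList = pre ++ c :: ('(' :: (mid ++ ')' :: post)))
    (hpre : ∀ x ∈ pre, pvParen x = false) (hc : pvParen c = false)
    (hmid : ∀ x ∈ mid, pvParen x = false) :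
    pvStepMulti (acc, peps ++ [p]) =
      (acc ++ pre.map (fun d => String.ofList [d]) ++ [String.ofList (c :: ('(' :: (mid ++ [')'])))],
       (peps ++ [p]) ++ [String.ofList post]) := by
  have hB : PySem.Str.isIn "(" p = true := (pv_isIn_iff p).mpr (by rw [hp]; simp)
  obtain ⟨hs1, hs2, hs3⟩ := pv_slices p pre c mid post hp
  simp only [pvStepMulti, pv_getD_last]
  rw [if_pos hB, pv_find_open p pre c mid post hp hpre hc, pv_find_close p pre c mid post hp hpre hc hmid]
  rw [hs1, hs2, hs3, pv_charAppend]
  simp [String.toList_ofList]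

theorem pv_stepOne_grp (acc peps : List String) (p : String)
    (pre : List Char) (c : Char) (mid post : List Char)
    (hp : p.toList = pre ++ c :: ('(' :: (mid ++ ')' :: post)))
    (hpre : ∀ x ∈ pre, pvParen x = false) (hc : pvParen c = false)
    (hmid : ∀ x ∈ mid, pvParen x = false) :
    (pvStepOne (acc, peps ++ [p])).1 =
      acc ++ pre.map (fun d => String.ofList [d]) ++
        String.ofList (c :: ('(' :: (mid ++ [')']))) :: post.map (fun d => String.ofList [d]) := by
  have hB : PySem.Str.isIn "(" p = true := (pv_isIn_iff p).mpr (by rw [hp]; simp)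
  obtain ⟨hs1, hs2, hs3⟩ := pv_slices p pre c mid post hp
  have hslice1 : PySem.Str.slice p (some ((pre.length + 1 : Nat) : Int))
      (some (((pre.length + 2 + mid.length : Nat) : Int) + 1)) =
      String.ofList ('(' :: (mid ++ [')'])) := by
    have e2 : ((pre.length + 2 + mid.length : Nat) : Int) + 1 = ((pre.length + 3 + mid.length : Nat) : Int) := by
      push_cast; ring
    show String.ofList (PySem.Chars.slice p.toList _ _) = _
    rw [e2]
    simp only [PySem.Chars.slice_eq_listSlice, PySem.List.slice_natCast]
    rw [hp, show pre ++ c :: ('(' :: (mid ++ ')' :: post)) = (pre ++ [c]) ++ '(' :: (mid ++ ')' :: post) from by simp]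
    rw [List.drop_left' (by simp)]
    rw [show pre.length + 3 + mid.length - (pre.length + 1) = mid.length + 2 from by omega]
    rw [show mid.length + 2 = (mid.length + 1) + 1 from by omega]
    rw [List.take_succ_cons, List.take_length_add_append]
    simp
  simp only [pvStepOne, pv_getD_last]
  rw [if_pos hB, pv_find_open p pre c mid post hp hpre hc, pv_find_close p pre c mid post hp hpre hc hmid]
  cases pre with
  | nil =>
    have hget : PySem.Str.pyGet? p 0 = some c := by
      rw [show ((0 : Int)) = ((0 : Nat) : Int) from rfl, PySem.Str.pyGet?_natCast, hp]
      simp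
    have heq : ((([] : List Char).length + 1 : Nat) : Int) = 1 := by simp
    rw [if_neg (by simp)]
    rw [if_pos heq]
    simp only [hget, List.nil_append] at *
    rw [hslice1, hs3, pv_charAppend]
    simp [String.toList_ofList]
  | cons y ys =>
    have hne : ((((y :: ys).length + 1 : Nat)) : Int) ≠ 1 := by push_cast [List.length_cons]; omega
    rw [if_pos hne]
    rw [if_neg hne]
    rw [hs1, hs2, hs3, pv_charAppend, pv_charAppend]
    simp [String.toList_ofList]

-- loop invariant of the 'no_mods > 1' branch: with k modifications left, k+1 iterations tokenize the rest
theorem pv_multi : ∀ (k : Nat) (l : List Char) (p : String) (acc peps : List String),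
    p.toList = l → l.count '(' = k →
    l.filter pvParen = (List.replicate k ['(', ')']).flatten →
    l.head? ≠ some '(' →
    (∀ q ∈ l.zip l.tail, q.2 = '(' → pvParen q.1 = false) →
    (pvStepMulti^[k + 1] (acc, peps ++ [p])).1 = acc ++ pvTok l := by
  intro k
  induction k with
  | zero =>
    intro l p acc peps hp hcnt _ _ _
    have hnotin : '(' ∉ l := List.count_eq_zero.mp hcnt
    rw [Function.iterate_one]
    rw [pv_stepMulti_nogrp acc peps p (by rw [hp]; exact hnotin)]
    rw [hp, pvTok_nogroup l (fun x hx => by rintro rfl; exact hnotin hx)]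
  | succ k ih =>
    intro l p acc peps hp hcnt h1 h2 h3
    have hin : '(' ∈ l := List.count_pos_iff.mp (by omega)
    obtain ⟨pre, c, mid, post, hl, hpre, hc, hmid, hpcnt, hpfil, hph, hpadj⟩ :=
      pv_decomp l hin (by rw [hcnt]; exact h1) h2 h3
    have hppost : post.count '(' = k := by omega
    rw [Function.iterate_succ_apply]
    rw [pv_stepMulti_grp acc peps p pre c mid post (by rw [hp, hl]) hpre hc hmid]
    rw [show (peps ++ [p]) ++ [String.ofList post] = (peps ++ [p]) ++ [String.ofList post] from rfl]
    rw [ih post (String.ofList post) _ (peps ++ [p]) String.toList_ofList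
      hppost (by rw [← hppost]; exact hpfil) hph hpadj]
    rw [hl, pvTok_group pre c mid post
      (fun x hx => by rintro rfl; simpa [pvParen] using hpre _ hx)
      (by rintro rfl; simp [pvParen] at hc)
      (fun x hx => by rintro rfl; simpa [pvParen] using hmid _ hx)]
    simp

-- ===== VERDICT (by name: the statement is the Claim_ definition above) =====
theorem list_of_residues_spec : Claim_equal_list_of_residues := by
  unfold Claim_equal_list_of_residues
  intro s _ hP
  unfold Spec_list_of_residues
  show list_of_residues s = list_of_residues_alt s
  have halt : list_of_residues_alt s = pvTok s.toList := rfl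
  rw [halt]
  unfold list_of_residues
  simp only [pv_count_paren]
  by_cases hgt : s.toList.count '(' > 1
  · rw [if_pos hgt]
    have hwf := hP.resolve_left (fun hno => by
      rw [List.count_eq_zero.mpr hno] at hgt; omega)
    obtain ⟨h1, h2, h3⟩ := hwf
    rw [pv_foldl_const]
    have hlen : (PySem.List.pyRange 0 ((s.toList.count '(' : Nat) + 1 : Int) 1).length =
        s.toList.count '(' + 1 := by
      rw [PySem.List.length_pyRange_one]; omega
    rw [hlen]
    have := pv_multi (s.toList.count '(') s.toList s [] [] rfl rfl h1 h2 h3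
    simpa using this
  · rw [if_neg hgt]
    by_cases h1 : s.toList.count '(' = 1
    · rw [if_pos h1]
      have hin : '(' ∈ s.toList := List.count_pos_iff.mp (by omega)
      have hwf := hP.resolve_left (fun hno => hno hin)
      obtain ⟨hf, hh, ha⟩ := hwf
      obtain ⟨pre, c, mid, post, hl, hpre, hc, hmid, hpcnt, _, _, _⟩ :=
        pv_decomp s.toList hin hf hh ha
      have hpost0 : '(' ∉ post := List.count_eq_zero.mp (by omega)
      rw [show PySem.List.pyRange 0 1 1 = [0] from rfl]
      rw [List.foldl_cons, List.foldl_nil]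
      have hstep := pv_stepOne_grp [] [] s pre c mid post hl hpre hc hmid
      simp only [List.nil_append] at hstep
      rw [hstep, hl, pvTok_group pre c mid post
        (fun x hx => by rintro rfl; simpa [pvParen] using hpre _ hx)
        (by rintro rfl; simp [pvParen] at hc)
        (fun x hx => by rintro rfl; simpa [pvParen] using hmid _ hx),
        pvTok_nogroup post (fun x hx => by rintro rfl; exact hpost0 hx)]
    · rw [if_neg h1]
      have h0 : '(' ∉ s.toList := List.count_eq_zero.mp (by omega)
      rw [pv_charAppend, pvTok_nogroup s.toList (fun x hx => by rintro rfl; exact h0 hx)]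
      simp
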